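-- pv_equiv track=rewrite | github.com/paulklemstine/factor | v41_ade_tower.py | generate_gl2_fp
-- ===== SOURCE A (Python) =====
-- def generate_gl2_fp(p):
--     """Generate all of GL(2,F_p) - matrices with nonzero determinant."""
--     gl2 = set()
--     for a in range(p):
--         for b in range(p):
--             for c in range(p):
--                 for d in range(p):
--                     det = (a*d - b*c) % p
--                     if det != 0:
--                         gl2.add(((a, b), (c, d)))
--     return gl2
-- ===== SOURCE B (Python) =====
-- def generate_gl2_fp(p):
--     """Generate all of GL(2,F_p) - matrices with nonzero determinant."""
--     gl2 = set()
--     for a in range(p):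
--         # For each residue r, precompute the second-row entries d with a*d % p != r.
--         good = [[d for d in range(p) if a * d % p != r] for r in range(p)]
--         for b in range(p):
--             for c in range(p):
--                 row1 = (a, b)
--                 for d in good[b * c % p]:
--                     gl2.add((row1, (c, d)))
--     return gl2
-- ===== Notes on version B (the rewrite author's own statement) =====
-- stated objective: alternative
-- what changed: Instead of testing the determinant of every (a,b,c,d) tuple, B precomputes, per first-row entry a, a table good[r] listing the second-row entries d with a*d % p != r, and the innermost loop just emits the precomputed list good[b*c % p] with no per-matrix arithmetic or test.
import Mathlib
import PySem

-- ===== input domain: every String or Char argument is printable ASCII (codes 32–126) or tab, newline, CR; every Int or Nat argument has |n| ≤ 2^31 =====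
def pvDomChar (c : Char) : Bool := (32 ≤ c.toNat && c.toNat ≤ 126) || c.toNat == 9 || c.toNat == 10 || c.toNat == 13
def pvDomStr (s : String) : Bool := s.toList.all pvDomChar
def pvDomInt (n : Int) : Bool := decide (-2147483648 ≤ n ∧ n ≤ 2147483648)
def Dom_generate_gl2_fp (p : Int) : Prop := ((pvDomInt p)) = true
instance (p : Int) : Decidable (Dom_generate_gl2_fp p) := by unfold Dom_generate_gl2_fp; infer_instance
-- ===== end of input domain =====

-- B precomputes, per first-row entry a, a table good[r] of the d with a*d % p ≠ r, so the
-- innermost loop just emits a precomputed list instead of testing a determinant per matrix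
-- (alternative decomposition; same set, same insertion order).

-- ===== PORT A =====
def generate_gl2_fp (p : Int) : List ((Int × Int) × (Int × Int)) :=
  (PySem.List.pyRange 0 p).foldl (fun gl2 a =>
    (PySem.List.pyRange 0 p).foldl (fun gl2 b =>
      (PySem.List.pyRange 0 p).foldl (fun gl2 c =>
        (PySem.List.pyRange 0 p).foldl (fun gl2 d =>
          let det := PySem.Int.mod (a * d - b * c) p
          if det ≠ 0 then PySem.Set.add gl2 ((a, b), (c, d)) else gl2) gl2) gl2) gl2)
    PySem.Set.empty

-- ===== PORT B =====
def generate_gl2_fp_alt (p : Int) : List ((Int × Int) × (Int × Int)) :=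
  (PySem.List.pyRange 0 p).foldl (fun gl2 a =>
    let good := (PySem.List.pyRange 0 p).map (fun r =>
      (PySem.List.pyRange 0 p).filter (fun d => PySem.Int.mod (a * d) p != r))
    (PySem.List.pyRange 0 p).foldl (fun gl2 b =>
      (PySem.List.pyRange 0 p).foldl (fun gl2 c =>
        let row1 := (a, b)
        -- good[b*c % p]: the index is provably in range whenever the loops run (0 ≤ b*c % p < p),
        -- so the total pyGetD is exact for Python's list indexing here
        (PySem.List.pyGetD good (PySem.Int.mod (b * c) p) []).foldl (fun gl2 d =>
          PySem.Set.add gl2 (row1, (c, d))) gl2) gl2) gl2)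
    PySem.Set.empty

-- ===== PRECONDITION & SPEC =====
def Spec_generate_gl2_fp (p : Int) (out : List ((Int × Int) × (Int × Int))) : Prop := out = generate_gl2_fp_alt p
instance (p : Int) (out : List ((Int × Int) × (Int × Int))) : Decidable (Spec_generate_gl2_fp p out) := by unfold Spec_generate_gl2_fp; infer_instance

-- ===== CLAIM (what is proved, stated in full; the proofs are below) =====
def Claim_equal_generate_gl2_fp : Prop := ∀ (p : Int), Dom_generate_gl2_fp p → Spec_generate_gl2_fp p (generate_gl2_fp p)

-- ===== LEMMAS AND PROOFS =====

-- The two determinant tests agree: a*d - b*c ≢ 0 (mod p)  ↔  a*d ≢ b*c (mod p).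
lemma gl2_cond_iff (p a b c d : Int) (hp : 0 < p) :
    (PySem.Int.mod (a * d - b * c) p ≠ 0) ↔
      (PySem.Int.mod (a * d) p ≠ PySem.Int.mod (b * c) p) := by
  rw [PySem.Int.mod_eq_emod_of_pos hp, PySem.Int.mod_eq_emod_of_pos hp,
    PySem.Int.mod_eq_emod_of_pos hp]
  exact (Int.emod_eq_emod_iff_emod_sub_eq_zero.symm).not

-- A's innermost loop equals B's sweep over the precomputed complement list good[b*c % p].
lemma gl2_inner (p a b c : Int) (hp : 0 < p) (s : List ((Int × Int) × (Int × Int))) :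
    (PySem.List.pyRange 0 p).foldl (fun gl2 d =>
        if PySem.Int.mod (a * d - b * c) p ≠ 0 then PySem.Set.add gl2 ((a, b), (c, d)) else gl2) s
    = (PySem.List.pyGetD ((PySem.List.pyRange 0 p).map (fun r =>
          (PySem.List.pyRange 0 p).filter (fun d => PySem.Int.mod (a * d) p != r)))
        (PySem.Int.mod (b * c) p) []).foldl (fun gl2 d =>
          PySem.Set.add gl2 ((a, b), (c, d))) s := by
  obtain ⟨n, rfl⟩ : ∃ n : ℕ, p = (n : Int) := ⟨p.toNat, by omega⟩
  have h0 : 0 ≤ PySem.Int.mod (b * c) (n : Int) := PySem.Int.mod_nonneg _ hp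
  have h1 : PySem.Int.mod (b * c) (n : Int) < (n : Int) := PySem.Int.mod_lt _ hp
  obtain ⟨k, hkbc⟩ : ∃ k : ℕ, PySem.Int.mod (b * c) (n : Int) = (k : Int) :=
    ⟨(PySem.Int.mod (b * c) (n : Int)).toNat, by omega⟩
  have hk : k < n := by omega
  rw [hkbc, PySem.List.pyGetD_map_pyRange _ n k _ hk, List.foldl_filter]
  congr 1
  funext gl2 d
  simp only [bne_iff_ne]
  rw [← hkbc, if_congr (gl2_cond_iff (n : Int) a b c d hp) rfl rfl]

-- ===== VERDICT (by name: the statement is the Claim_ definition above) =====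
theorem generate_gl2_fp_spec : Claim_equal_generate_gl2_fp := by
  intro p _
  unfold Spec_generate_gl2_fp generate_gl2_fp generate_gl2_fp_alt
  rcases le_or_gt p 0 with hp | hp
  · have h : PySem.List.pyRange 0 p = [] := by
      apply List.eq_nil_iff_forall_not_mem.mpr
      intro x hx
      have := PySem.List.mem_pyRange_one.mp hx
      omega
    simp [h]
  · congr 1
    funext gl2 a
    congr 1
    funext gl2 b
    congr 1
    funext gl2 c
    exact gl2_inner p a b c hp gl2
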